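-- pv_equiv track=rewrite | github.com/chupinana04/Python-PTIT | CodePTIT/PY01057.py | check
-- ===== SOURCE A (Python) =====
-- def check(s):
--     for i in range(len(s)):
--         if i == 2 or i == 3 or i == 5 or i == 7:
--             if s[i] != '2' and s[i] != '3' and s[i] != '5' and s[i] != '7':
--                 return "NO"
--         if i == 0 or i == 1 or i == 4 or i == 6 or i == 8 or i == 9:
--             if s[i] == '2' or s[i] == '3' or s[i] == '5' or s[i] == '7':
--                 return "NO"
--     return "YES"
-- ===== SOURCE B (Python) =====
-- PATTERN = "NNPPNPNPNN"
--
-- def check(s):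
--     sig = ''.join('P' if c in '2357' else 'N' for c in s[:10])
--     return "YES" if sig == PATTERN[:len(sig)] else "NO"
-- ===== Notes on version B (the rewrite author's own statement) =====
-- stated objective: alternative
-- what changed: B is table-driven: it maps the first 10 characters to a P/N classification string in one pass and decides with a single string comparison against a fixed 10-character pattern constant, instead of A's index-by-index scan with chained branch tests and early returns.
import Mathlib
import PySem

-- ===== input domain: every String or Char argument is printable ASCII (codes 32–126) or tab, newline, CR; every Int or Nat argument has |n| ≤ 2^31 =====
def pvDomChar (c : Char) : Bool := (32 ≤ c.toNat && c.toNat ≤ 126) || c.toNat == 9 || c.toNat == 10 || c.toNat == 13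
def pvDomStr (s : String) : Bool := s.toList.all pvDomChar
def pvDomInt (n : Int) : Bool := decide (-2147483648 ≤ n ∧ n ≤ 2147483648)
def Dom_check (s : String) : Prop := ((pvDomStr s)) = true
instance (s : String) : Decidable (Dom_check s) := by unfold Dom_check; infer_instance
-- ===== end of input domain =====

-- B is table-driven: it classifies the first 10 characters into a P/N signature string and
-- compares it against the fixed pattern "NNPPNPNPNN"; objective: alternative (same cost).

-- ===== PORT A =====
-- the loop body of A, walking the remaining indices of range(len(s))
def checkGo (cs : List Char) : List Nat → String
  | [] => "YES"
  | i :: rest =>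
    let c := cs.getD i ' '
    if (i == 2 || i == 3 || i == 5 || i == 7) &&
       (c != '2' && c != '3' && c != '5' && c != '7') then "NO"
    else if (i == 0 || i == 1 || i == 4 || i == 6 || i == 8 || i == 9) &&
       (c == '2' || c == '3' || c == '5' || c == '7') then "NO"
    else checkGo cs rest

def check (s : String) : String :=
  checkGo s.toList (List.range s.toList.length)

-- ===== PORT B =====
def pvIsPrimeDigit (c : Char) : Bool := c == '2' || c == '3' || c == '5' || c == '7'

def pvClass (c : Char) : Char := if pvIsPrimeDigit c then 'P' else 'N'

def pvPattern : List Char := ['N','N','P','P','N','P','N','P','N','N']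

def check_alt (s : String) : String :=
  let sig := (s.toList.take 10).map pvClass
  if sig = pvPattern.take sig.length then "YES" else "NO"

-- ===== PRECONDITION & SPEC =====
def Spec_check (s : String) (out : String) : Prop := out = check_alt s
instance (s : String) (out : String) : Decidable (Spec_check s out) := by unfold Spec_check; infer_instance

-- ===== CLAIM (what is proved, stated in full; the proofs are below) =====
def Claim_equal_check : Prop := ∀ (s : String), Dom_check s → Spec_check s (check s)

-- ===== LEMMAS AND PROOFS =====

-- A's "return NO at index i" condition, as one boolean
def badA (cs : List Char) (i : Nat) : Bool :=
  let c := cs.getD i ' '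
  ((i == 2 || i == 3 || i == 5 || i == 7) &&
     (c != '2' && c != '3' && c != '5' && c != '7')) ||
  ((i == 0 || i == 1 || i == 4 || i == 6 || i == 8 || i == 9) &&
     (c == '2' || c == '3' || c == '5' || c == '7'))

theorem checkGo_eq_any (cs : List Char) (is : List Nat) :
    checkGo cs is = if is.any (badA cs) then "NO" else "YES" := by
  induction is with
  | nil => simp [checkGo]
  | cons i rest ih =>
    simp only [checkGo, List.any_cons, badA]
    split_ifs with h1 h2 h3 <;> simp_all; tauto

-- for i < 10, A's failure test at i is exactly a mismatch with the pattern table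
theorem badA_eq_mismatch (cs : List Char) (i : Nat) (hi : i < 10) :
    badA cs i = false ↔ pvClass (cs.getD i ' ') = pvPattern.getD i 'N' := by
  simp only [badA, pvClass]
  generalize cs.getD i ' ' = c
  interval_cases i <;> cases h : pvIsPrimeDigit c <;>
    simp_all [pvIsPrimeDigit, pvPattern] <;> tauto

theorem badA_ge_ten (cs : List Char) (i : Nat) (hi : 10 ≤ i) :
    badA cs i = false := by
  have h2 : (i == 2) = false := by simp; omega
  have h3 : (i == 3) = false := by simp; omega
  have h5 : (i == 5) = false := by simp; omega
  have h7 : (i == 7) = false := by simp; omega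
  have h0 : (i == 0) = false := by simp; omega
  have h1 : (i == 1) = false := by simp; omega
  have h4 : (i == 4) = false := by simp; omega
  have h6 : (i == 6) = false := by simp; omega
  have h8 : (i == 8) = false := by simp; omega
  have h9 : (i == 9) = false := by simp; omega
  simp [badA, h0, h1, h2, h3, h4, h5, h6, h7, h8, h9]

-- the signature-vs-pattern comparison, read pointwise
theorem sig_eq_iff (cs : List Char) :
    ((cs.take 10).map pvClass = pvPattern.take ((cs.take 10).map pvClass).length)
      ↔ ∀ i, i < cs.length → i < 10 → pvClass (cs.getD i ' ') = pvPattern.getD i 'N' := by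
  have hlen : ((cs.take 10).map pvClass).length = min 10 cs.length := by simp
  rw [List.ext_getElem_iff]
  constructor
  · rintro ⟨-, h⟩ i hin hi10
    have hlt : i < ((cs.take 10).map pvClass).length := by omega
    have := h i hlt (by simp [pvPattern]; try omega)
    simpa [List.getElem_take, List.getElem_map, List.getD_eq_getElem?_getD,
      List.getElem?_eq_getElem, hin, show i < pvPattern.length by simp [pvPattern]; try omega] using this
  · intro h
    refine ⟨by simp [pvPattern]; try omega, ?_⟩
    intro i h1 h2
    have hin : i < cs.length := by omega
    have hi10 : i < 10 := by omega
    have := h i hin hi10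
    simpa [List.getElem_take, List.getElem_map, List.getD_eq_getElem?_getD,
      List.getElem?_eq_getElem, hin, show i < pvPattern.length by simp [pvPattern]; try omega] using this

theorem any_eq_iff (cs : List Char) :
    (List.range cs.length).any (badA cs) = false
      ↔ ∀ i, i < cs.length → i < 10 → pvClass (cs.getD i ' ') = pvPattern.getD i 'N' := by
  simp only [List.any_eq_false, List.mem_range, Bool.not_eq_true]
  constructor
  · intro h i hin hi10
    exact (badA_eq_mismatch cs i hi10).1 (h i hin)
  · intro h i hin
    by_cases hi10 : i < 10
    · exact (badA_eq_mismatch cs i hi10).2 (h i hin hi10)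
    · exact badA_ge_ten cs i (by omega)

-- ===== VERDICT (by name: the statement is the Claim_ definition above) =====
theorem check_spec : Claim_equal_check := by
  intro s _
  unfold Spec_check check check_alt
  rw [checkGo_eq_any]
  have key := (any_eq_iff s.toList).trans (sig_eq_iff s.toList).symm
  dsimp only
  split_ifs with h1 h2 h2
  · rw [key.2 h2] at h1
    exact (Bool.false_ne_true h1).elim
  · rfl
  · rfl
  · exact absurd (key.1 (by simpa using h1)) h2
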